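-- pv_equiv track=rewrite | github.com/securylight/artifact | prompts/generate-test-prompts-and-fix-instructions.py | is_valid_test_prompt
-- ===== SOURCE A (Python) =====
-- def is_valid_test_prompt(prompt: str) -> bool:
--     if not prompt or len(prompt.strip()) < 20:
--         return False
--
--     lowered = prompt.lower()
--     banned_terms = [
--         "owasp",
--         "ssrf",
--         "server-side request forgery",
--         "server side request forgery",
--         "exploit payload",
--         "red team",
--         "python",
--         "java",
--         "javascript",
--         "typescript",
--         "node.js",
--         "nodejs",
--         "fastapi",
--         "spring",
--         "express"
--     ]
--
--     for term in banned_terms: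
--         if term in lowered:
--             return False
--
--     return True
-- ===== SOURCE B (Python) =====
-- BANNED_TERMS = (
--     "owasp",
--     "ssrf",
--     "server-side request forgery",
--     "server side request forgery",
--     "exploit payload",
--     "red team",
--     "python",
--     "java",
--     "javascript",
--     "typescript",
--     "node.js",
--     "nodejs",
--     "fastapi",
--     "spring",
--     "express",
-- )
--
--
-- def _match_at(prompt, i, term):
--     # case-insensitive char-by-char match of term at position i (no full lowering)
--     for ch in term:
--         if i >= len(prompt) or prompt[i].lower() != ch:
--             return False
--         i += 1
--     return True
--
--
-- def is_valid_test_prompt(prompt: str) -> bool: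
--     if not prompt or len(prompt.strip()) < 20:
--         return False
--     i = 0
--     while i < len(prompt):
--         for term in BANNED_TERMS:
--             if _match_at(prompt, i, term):
--                 return False
--         i += 1
--     return True
-- ===== Notes on version B (the rewrite author's own statement) =====
-- stated objective: alternative
-- what changed: Instead of lowering the whole text and running one full substring search per banned term, B never builds a lowered copy: it scans the text once, suffix by suffix, matching each banned term case-insensitively character by character at the current position.
import Mathlib
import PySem

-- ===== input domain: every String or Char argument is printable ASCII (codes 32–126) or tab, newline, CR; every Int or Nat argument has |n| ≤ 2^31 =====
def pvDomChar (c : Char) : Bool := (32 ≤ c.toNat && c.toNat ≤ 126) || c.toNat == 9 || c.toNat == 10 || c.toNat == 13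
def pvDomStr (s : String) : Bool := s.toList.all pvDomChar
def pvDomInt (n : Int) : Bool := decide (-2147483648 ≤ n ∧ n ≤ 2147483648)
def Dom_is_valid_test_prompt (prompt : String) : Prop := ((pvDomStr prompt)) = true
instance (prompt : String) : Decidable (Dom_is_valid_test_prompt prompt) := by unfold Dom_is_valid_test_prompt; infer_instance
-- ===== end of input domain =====

-- B avoids building a lowered copy of the text: one suffix-by-suffix scan matching each
-- banned term case-insensitively character by character (objective: alternative; same behaviour).

-- ===== PORT A =====
def bannedTermsA : List (List Char) :=
  ["owasp".toList, "ssrf".toList, "server-side request forgery".toList,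
   "server side request forgery".toList, "exploit payload".toList, "red team".toList,
   "python".toList, "java".toList, "javascript".toList, "typescript".toList,
   "node.js".toList, "nodejs".toList, "fastapi".toList, "spring".toList, "express".toList]

-- 'for term in banned_terms: if term in lowered: return False' as structural recursion
def aTermLoop (lowered : List Char) : List (List Char) → Bool
  | [] => true
  | t :: rest => if PySem.Chars.isIn t lowered then false else aTermLoop lowered rest

def is_valid_test_prompt (prompt : String) : Bool :=
  if prompt.toList = [] ∨ (PySem.Chars.strip prompt.toList).length < 20 then false
  else aTermLoop (PySem.Chars.lower prompt.toList) bannedTermsA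

-- ===== PORT B =====
def bannedTermsB : List String :=
  ["owasp", "ssrf", "server-side request forgery", "server side request forgery",
   "exploit payload", "red team", "python", "java", "javascript", "typescript",
   "node.js", "nodejs", "fastapi", "spring", "express"]

-- _match_at: case-insensitive char-by-char match of a term at the head of a suffix
def matchCI : List Char → List Char → Bool
  | _, [] => true
  | [], _ :: _ => false
  | x :: s, c :: t => (PySem.Chars.lowerChar x == c) && matchCI s t

-- the 'while i < len(prompt)' loop, as recursion over suffixes of the text
def scanCI : List Char → Bool
  | [] => false
  | x :: rest => bannedTermsB.any (fun t => matchCI (x :: rest) t.toList) || scanCI rest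

def is_valid_test_prompt_alt (prompt : String) : Bool :=
  if prompt.toList = [] ∨ (PySem.Chars.strip prompt.toList).length < 20 then false
  else !(scanCI prompt.toList)

-- ===== PRECONDITION & SPEC =====
def Spec_is_valid_test_prompt (prompt : String) (out : Bool) : Prop := out = is_valid_test_prompt_alt prompt
instance (prompt : String) (out : Bool) : Decidable (Spec_is_valid_test_prompt prompt out) := by unfold Spec_is_valid_test_prompt; infer_instance

-- ===== CLAIM (what is proved, stated in full; the proofs are below) =====
def Claim_equal_is_valid_test_prompt : Prop := ∀ (prompt : String), Dom_is_valid_test_prompt prompt → Spec_is_valid_test_prompt prompt (is_valid_test_prompt prompt)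

-- ===== LEMMAS AND PROOFS =====

lemma aTermLoop_eq_not_any (lowered : List Char) (L : List (List Char)) :
    aTermLoop lowered L = !(L.any (fun t => PySem.Chars.isIn t lowered)) := by
  induction L with
  | nil => simp [aTermLoop]
  | cons t rest ih =>
    simp only [aTermLoop, List.any_cons]
    split_ifs with h <;> simp [h, ih]

lemma lower_eq_map (s : List Char) : PySem.Chars.lower s = s.map PySem.Chars.lowerChar := rfl

lemma matchCI_eq_prefix (t s : List Char) :
    matchCI s t = decide (t <+: PySem.Chars.lower s) := by
  induction t generalizing s with
  | nil => cases s <;> simp [matchCI]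
  | cons c t ih =>
    cases s with
    | nil => simp [matchCI, PySem.Chars.lower]
    | cons x s =>
      simp only [matchCI, lower_eq_map, List.map_cons, ih, lower_eq_map]
      by_cases h : PySem.Chars.lowerChar x = c
      · simp [h, List.cons_prefix_cons]
      · simp [h, Ne.symm h, List.cons_prefix_cons]

lemma scanCI_eq_any_isIn (s : List Char) :
    scanCI s = bannedTermsB.any (fun t => PySem.Chars.isIn t.toList (PySem.Chars.lower s)) := by
  induction s with
  | nil =>
    simp only [scanCI, PySem.Chars.lower, List.map_nil]
    rw [Bool.eq_iff_iff]
    simp only [Bool.false_eq_true, false_iff, List.any_eq_true, not_exists]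
    rintro t ⟨ht, hin⟩
    rw [PySem.Chars.isIn_iff_infix, List.infix_nil] at hin
    fin_cases ht <;> simp_all
  | cons x rest ih =>
    simp only [scanCI, ih, matchCI_eq_prefix]
    rw [Bool.eq_iff_iff]
    simp only [Bool.or_eq_true, List.any_eq_true, decide_eq_true_eq, PySem.Chars.isIn_iff_infix,
      lower_eq_map, List.map_cons]
    constructor
    · rintro (⟨t, ht, hp⟩ | ⟨t, ht, hi⟩)
      · exact ⟨t, ht, hp.isInfix⟩
      · exact ⟨t, ht, List.infix_cons hi⟩
    · rintro ⟨t, ht, hi⟩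
      rw [List.infix_cons_iff] at hi
      rcases hi with hp | hi
      · exact Or.inl ⟨t, ht, hp⟩
      · exact Or.inr ⟨t, ht, hi⟩

lemma banned_lists_agree (lowered : List Char) :
    bannedTermsA.any (fun t => PySem.Chars.isIn t lowered)
      = bannedTermsB.any (fun t => PySem.Chars.isIn t.toList lowered) := rfl

-- ===== VERDICT (by name: the statement is the Claim_ definition above) =====
theorem is_valid_test_prompt_spec : Claim_equal_is_valid_test_prompt := by
  intro prompt _
  unfold Spec_is_valid_test_prompt is_valid_test_prompt is_valid_test_prompt_alt
  split_ifs with h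
  · rfl
  · rw [aTermLoop_eq_not_any, scanCI_eq_any_isIn, banned_lists_agree]
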